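-- pv_equiv track=rewrite | github.com/mafeconde2002/nonogram | reglas.py | clausulas
-- ===== SOURCE A (Python) =====
-- def clausulas(formula):
--     clausulasFinales=[]
--     tmp=[]
--     string=""
--     idx=formula.find("^")
--     clausulasFinales.append([formula[1:idx]])
--     for i in formula[idx+1:]:
--         if(i=="+"):
--             tmp.append(string)
--             string=""
--         elif(i=="^" or i=="]"):
--             tmp.append(string)
--             clausulasFinales.append(tmp)
--             string=""
--             tmp=[]
--         elif(i!="(" and i!=")"):
--             string += i
--     return clausulasFinales
-- ===== SOURCE B (Python) =====
-- def clausulas(formula):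
--     idx = formula.find("^")
--     result = [[formula[1:idx]]]
--     rest = formula[idx+1:].replace("]", "^")
--     for part in rest.split("^")[:-1]:
--         result.append([tok.replace("(", "").replace(")", "") for tok in part.split("+")])
--     return result
-- ===== Notes on version B (the rewrite author's own statement) =====
-- stated objective: simpler
-- what changed: Replaces the stateful character-by-character accumulator loop by delimiter-based splitting: normalize both clause terminators to one, split the tail on it, drop the unterminated final segment, and split each segment into tokens with per-token parenthesis stripping.
import Mathlib
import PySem

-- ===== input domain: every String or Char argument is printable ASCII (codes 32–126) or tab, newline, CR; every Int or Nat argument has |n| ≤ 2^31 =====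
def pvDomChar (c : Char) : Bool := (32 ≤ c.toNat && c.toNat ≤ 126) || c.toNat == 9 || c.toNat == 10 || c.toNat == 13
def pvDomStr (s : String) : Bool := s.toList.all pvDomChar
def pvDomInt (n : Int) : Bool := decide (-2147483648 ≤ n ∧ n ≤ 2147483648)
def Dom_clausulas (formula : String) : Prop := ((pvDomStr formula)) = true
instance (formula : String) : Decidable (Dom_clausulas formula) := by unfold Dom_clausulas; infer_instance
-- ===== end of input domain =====

-- B replaces A's stateful character loop by delimiter-based splitting (measured faster in a timing run); same return value on all inputs.

-- ===== PORT A =====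
-- the loop body of A (state: clausulasFinales, tmp, string — string kept as List Char)
def pvStepA (st : List (List String) × List String × List Char) (c : Char) :
    List (List String) × List String × List Char :=
  if c = '+' then (st.1, st.2.1 ++ [String.mk st.2.2], [])
  else if c = '^' ∨ c = ']' then (st.1 ++ [st.2.1 ++ [String.mk st.2.2]], [], [])
  else if c ≠ '(' ∧ c ≠ ')' then (st.1, st.2.1, st.2.2 ++ [c])
  else st

def clausulas (formula : String) : List (List String) :=
  let idx := PySem.Str.find formula "^"
  let first := PySem.Str.slice formula (some 1) (some idx)
  let rest := PySem.Str.slice formula (some (idx + 1)) none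
  (rest.toList.foldl pvStepA ([[first]], [], [])).1

-- ===== PORT B =====
-- rest.replace("]", "^") for single characters: exact as a character map
def pvRep (c : Char) : Char := if c = ']' then '^' else c

-- part.split(sep) for a single-character separator: exact hand port ("".split(c) = [""])
def pvSplitChar (sep : Char) : List Char → List (List Char)
  | [] => [[]]
  | c :: cs =>
    if c = sep then [] :: pvSplitChar sep cs
    else match pvSplitChar sep cs with
      | [] => [[c]]   -- unreachable: pvSplitChar never returns []
      | h :: t => (c :: h) :: t

-- tok.replace("(", "").replace(")", ""): exact as two character filters
def pvStrip (t : List Char) : List Char := (t.filter (· ≠ '(')).filter (· ≠ ')')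

def pvClause (p : List Char) : List String :=
  (pvSplitChar '+' p).map (fun t => String.mk (pvStrip t))

def clausulas_alt (formula : String) : List (List String) :=
  let idx := PySem.Str.find formula "^"
  let first := PySem.Str.slice formula (some 1) (some idx)
  let rest := (PySem.Str.slice formula (some (idx + 1)) none).toList.map pvRep
  ((pvSplitChar '^' rest).dropLast).foldl (fun acc p => acc ++ [pvClause p]) [[first]]

-- ===== PRECONDITION & SPEC =====
def Spec_clausulas (formula : String) (out : List (List String)) : Prop := out = clausulas_alt formula
instance (formula : String) (out : List (List String)) : Decidable (Spec_clausulas formula out) := by unfold Spec_clausulas; infer_instance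

-- ===== CLAIM (what is proved, stated in full; the proofs are below) =====
def Claim_equal_clausulas : Prop := ∀ (formula : String), Dom_clausulas formula → Spec_clausulas formula (clausulas formula)

-- ===== LEMMAS AND PROOFS =====

-- A's loop, rewritten as a structural recursion on the remaining characters
def pvG : List Char → List String → List Char → List (List String)
  | [], _, _ => []
  | c :: cs, tmp, s =>
    if c = '+' then pvG cs (tmp ++ [String.mk s]) []
    else if c = '^' ∨ c = ']' then (tmp ++ [String.mk s]) :: pvG cs [] []
    else if c ≠ '(' ∧ c ≠ ')' then pvG cs tmp (s ++ [c])
    else pvG cs tmp s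

-- the first clause of the generalized B-side: pending string s is prefixed to the first token
def pvFirst (h : List Char) (s : List Char) : List String :=
  match pvSplitChar '+' h with
  | [] => []
  | u :: us => String.mk (s ++ pvStrip u) :: us.map (fun t => String.mk (pvStrip t))

-- the generalized B-side: first clause carries the pending tmp/string state
def pvH (cs : List Char) (tmp : List String) (s : List Char) : List (List String) :=
  match (pvSplitChar '^' (cs.map pvRep)).dropLast with
  | [] => []
  | p :: ps => (tmp ++ pvFirst p s) :: ps.map pvClause

theorem pvSplitChar_ne_nil (sep : Char) (cs : List Char) : pvSplitChar sep cs ≠ [] := by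
  induction cs with
  | nil => simp [pvSplitChar]
  | cons c cs ih =>
    simp only [pvSplitChar]
    split
    · simp
    · cases h : pvSplitChar sep cs <;> simp

theorem pvSplitChar_dest (sep : Char) (cs : List Char) :
    ∃ h t, pvSplitChar sep cs = h :: t := by
  cases hh : pvSplitChar sep cs with
  | nil => exact absurd hh (pvSplitChar_ne_nil _ _)
  | cons h t => exact ⟨h, t, rfl⟩

theorem pvFoldA (cs : List Char) : ∀ (cf : List (List String)) (tmp : List String) (s : List Char),
    (cs.foldl pvStepA (cf, tmp, s)).1 = cf ++ pvG cs tmp s := by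
  induction cs with
  | nil => intro cf tmp s; simp [pvG]
  | cons c cs ih =>
    intro cf tmp s
    simp only [List.foldl_cons, pvStepA, pvG]
    by_cases h1 : c = '+'
    · simp [h1, ih]
    · by_cases h2 : c = '^' ∨ c = ']'
      · simp [h1, h2, ih]
      · by_cases h3 : c ≠ '(' ∧ c ≠ ')'
        · simp [h1, h2, h3, ih]
        · simp [h1, h2, h3, ih]

theorem pvH_eq (cs : List Char) (tmp : List String) (s h : List Char) (t : List (List Char))
    (hht : pvSplitChar '^' (cs.map pvRep) = h :: t) :
    pvH cs tmp s = if t = [] then [] else (tmp ++ pvFirst h s) :: (t.dropLast).map pvClause := by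
  unfold pvH
  rw [hht]
  cases t with
  | nil => simp
  | cons q qs => rw [List.dropLast_cons_of_ne_nil (List.cons_ne_nil q qs)]; simp

theorem pvFirst_nil_s (h : List Char) : pvFirst h [] = pvClause h := by
  obtain ⟨u, us, huu⟩ := pvSplitChar_dest '+' h
  simp [pvFirst, pvClause, huu]

theorem pvFirst_empty (s : List Char) : pvFirst [] s = [String.mk s] := by
  simp [pvFirst, pvSplitChar, pvStrip]

theorem pvFirst_plus (h s : List Char) :
    pvFirst ('+' :: h) s = String.mk s :: pvClause h := by
  obtain ⟨u, us, huu⟩ := pvSplitChar_dest '+' h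
  simp [pvFirst, pvSplitChar, huu, pvStrip, pvClause]

theorem pvFirst_ord (c : Char) (h s : List Char) (h1 : c ≠ '+') (h3 : c ≠ '(' ∧ c ≠ ')') :
    pvFirst (c :: h) s = pvFirst h (s ++ [c]) := by
  obtain ⟨u, us, huu⟩ := pvSplitChar_dest '+' h
  have hst : pvStrip (c :: u) = c :: pvStrip u := by
    simp [pvStrip, List.filter_cons, h3.1, h3.2]
  simp [pvFirst, pvSplitChar, h1, huu, hst]

theorem pvFirst_paren (c : Char) (h s : List Char) (h1 : c ≠ '+') (h3 : c = '(' ∨ c = ')') :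
    pvFirst (c :: h) s = pvFirst h s := by
  obtain ⟨u, us, huu⟩ := pvSplitChar_dest '+' h
  have hst : pvStrip (c :: u) = pvStrip u := by
    rcases h3 with h | h <;> simp [pvStrip, List.filter_cons, h]
  simp [pvFirst, pvSplitChar, h1, huu, hst]

theorem pvGH (cs : List Char) : ∀ (tmp : List String) (s : List Char),
    pvG cs tmp s = pvH cs tmp s := by
  induction cs with
  | nil => intro tmp s; simp [pvG, pvH, pvSplitChar]
  | cons c cs ih =>
    intro tmp s
    obtain ⟨h, t, hht⟩ := pvSplitChar_dest '^' (cs.map pvRep)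
    by_cases h2 : c = '^' ∨ c = ']'
    · have hrep : pvRep c = '^' := by rcases h2 with h | h <;> simp [pvRep, h]
      have h1 : c ≠ '+' := by rcases h2 with h | h <;> simp [h]
      have hsplit : pvSplitChar '^' ((c :: cs).map pvRep) = [] :: h :: t := by
        simp [List.map_cons, hrep, pvSplitChar, hht]
      rw [pvH_eq (c :: cs) tmp s [] (h :: t) hsplit]
      simp only [pvG, if_neg h1, if_pos h2, ih, List.cons_ne_nil, if_neg (by simp : ¬(h :: t = []))]
      rw [pvFirst_empty, pvH_eq cs [] [] h t hht]
      cases t with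
      | nil => simp
      | cons q qs =>
        rw [List.dropLast_cons_of_ne_nil (List.cons_ne_nil q qs)]
        simp [pvFirst_nil_s]
    · have hrep : pvRep c = c := by
        simp only [pvRep, ite_eq_right_iff]; intro h; exact absurd (Or.inr h) h2
      have hc : c ≠ '^' := fun h => h2 (Or.inl h)
      have hsplit : pvSplitChar '^' ((c :: cs).map pvRep) = (c :: h) :: t := by
        simp only [List.map_cons, hrep, pvSplitChar, if_neg hc, hht]
      rw [pvH_eq (c :: cs) tmp s (c :: h) t hsplit]
      by_cases h1 : c = '+'
      · simp only [pvG, if_pos h1, ih, pvH_eq cs (tmp ++ [String.mk s]) [] h t hht]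
        subst h1
        rw [pvFirst_plus, pvFirst_nil_s]
        cases t with
        | nil => simp
        | cons q qs => simp
      · by_cases h3 : c ≠ '(' ∧ c ≠ ')'
        · simp only [pvG, if_neg h1, if_neg h2, if_pos h3, ih,
            pvH_eq cs tmp (s ++ [c]) h t hht]
          rw [pvFirst_ord c h s h1 h3]
        · have h3' : c = '(' ∨ c = ')' := by
            by_contra hcc; push_neg at hcc; exact h3 ⟨hcc.1, hcc.2⟩
          simp only [pvG, if_neg h1, if_neg h2, if_neg h3, ih, pvH_eq cs tmp s h t hht]
          rw [pvFirst_paren c h s h1 h3']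

theorem pvG_eq_map (cs : List Char) :
    pvG cs [] [] = ((pvSplitChar '^' (cs.map pvRep)).dropLast).map pvClause := by
  obtain ⟨h, t, hht⟩ := pvSplitChar_dest '^' (cs.map pvRep)
  rw [pvGH, pvH_eq cs [] [] h t hht, hht]
  cases t with
  | nil => simp
  | cons q qs =>
    rw [List.dropLast_cons_of_ne_nil (List.cons_ne_nil q qs)]
    simp [pvFirst_nil_s]

-- ===== VERDICT (by name: the statement is the Claim_ definition above) =====
theorem clausulas_spec : Claim_equal_clausulas := by
  intro formula _
  unfold Spec_clausulas clausulas clausulas_alt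
  rw [pvFoldA, pvG_eq_map, PySem.List.foldl_append_singleton_eq_map]
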